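-- pv_equiv track=rewrite | github.com/MaxPowerScience/GermanSentiment | src/extractRawData.py | sort_text_by_sentiment
-- ===== SOURCE A (Python) =====
-- def sort_text_by_sentiment(texts, sentiments):
--     sorted_positive_texts, sorted_negative_texts, sorted_neutral_texts = [], [], []
--     sorted_positive_sentiment, sorted_negative_sentiment, sorted_neutral_sentiment = [], [], []
--
--     for idx, text in enumerate(texts):
--         if sentiments[idx] == 'positive':
--             sorted_positive_texts.append(text)
--             sorted_positive_sentiment.append(sentiments[idx])
--         elif sentiments[idx] == 'negative':
--             sorted_negative_texts.append(text)
--             sorted_negative_sentiment.append(sentiments[idx])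
--         else:
--             sorted_neutral_texts.append(text)
--             sorted_neutral_sentiment.append(sentiments[idx])
--
--     sorted_texts = sorted_positive_texts + sorted_negative_texts + sorted_neutral_texts
--     sorted_sentiments = sorted_positive_sentiment + sorted_negative_sentiment + sorted_neutral_sentiment
--
--     return sorted_texts, sorted_sentiments
-- ===== SOURCE B (Python) =====
-- def sort_text_by_sentiment(texts, sentiments):
--     order = {'positive': 0, 'negative': 1}
--     idx_order = sorted(range(len(texts)), key=lambda i: order.get(sentiments[i], 2))
--     sorted_texts = [texts[i] for i in idx_order]
--     sorted_sentiments = [sentiments[i] for i in idx_order]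
--     return sorted_texts, sorted_sentiments
-- ===== Notes on version B (the rewrite author's own statement) =====
-- stated objective: idiomatic
-- what changed: Replaces the explicit three-bucket partition (six accumulator lists concatenated at the end) by one stable sort of the index list under a priority key (positive=0, negative=1, other=2) from which both output lists are built.
import Mathlib
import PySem

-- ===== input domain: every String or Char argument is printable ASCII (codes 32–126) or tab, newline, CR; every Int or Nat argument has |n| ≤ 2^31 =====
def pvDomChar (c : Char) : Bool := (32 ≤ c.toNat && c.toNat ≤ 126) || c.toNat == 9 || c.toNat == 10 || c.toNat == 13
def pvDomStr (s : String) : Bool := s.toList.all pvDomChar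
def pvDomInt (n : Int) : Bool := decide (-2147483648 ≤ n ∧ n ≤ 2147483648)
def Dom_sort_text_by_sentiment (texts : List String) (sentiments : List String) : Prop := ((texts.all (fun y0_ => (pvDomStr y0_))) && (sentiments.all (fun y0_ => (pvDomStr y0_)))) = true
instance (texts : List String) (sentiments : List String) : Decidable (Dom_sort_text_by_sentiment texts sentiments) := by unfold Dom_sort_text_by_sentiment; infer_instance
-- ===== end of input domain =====

-- B replaces A's explicit three-bucket partition by one stable index sort under a priority key (idiomatic, same result).


-- ===== PORT A =====
-- state: ((positive_texts, negative_texts, neutral_texts), (positive_sents, negative_sents, neutral_sents))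
def pvStepA (sentiments : List String)
    (st : (List String × List String × List String) × (List String × List String × List String))
    (p : Int × String) :
    (List String × List String × List String) × (List String × List String × List String) :=
  let s := PySem.List.pyGetD sentiments p.1 ""
  if s = "positive" then
    ((st.1.1 ++ [p.2], st.1.2.1, st.1.2.2), (st.2.1 ++ [s], st.2.2.1, st.2.2.2))
  else if s = "negative" then
    ((st.1.1, st.1.2.1 ++ [p.2], st.1.2.2), (st.2.1, st.2.2.1 ++ [s], st.2.2.2))
  else
    ((st.1.1, st.1.2.1, st.1.2.2 ++ [p.2]), (st.2.1, st.2.2.1, st.2.2.2 ++ [s]))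

def sort_text_by_sentiment (texts : List String) (sentiments : List String) : List String × List String :=
  let st := (PySem.List.enumerate texts).foldl (pvStepA sentiments) (([], [], []), ([], [], []))
  (st.1.1 ++ st.1.2.1 ++ st.1.2.2, st.2.1 ++ st.2.2.1 ++ st.2.2.2)

-- ===== PORT B =====
def pvOrder : PySem.Dict String Int := PySem.Dict.ofList [("positive", 0), ("negative", 1)]

def sort_text_by_sentiment_alt (texts : List String) (sentiments : List String) : List String × List String :=
  let key : Int → Int := fun i => PySem.Dict.getD pvOrder (PySem.List.pyGetD sentiments i "") 2
  let idxOrder := PySem.List.sorted (PySem.List.pyRange 0 (PySem.List.len texts)) key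
  (idxOrder.map (fun i => PySem.List.pyGetD texts i ""),
   idxOrder.map (fun i => PySem.List.pyGetD sentiments i ""))

-- ===== PRECONDITION & SPEC =====
-- Pre_ excludes exactly the inputs where Python A raises IndexError (sentiments shorter than texts); B raises there too.
def Pre_sort_text_by_sentiment (texts : List String) (sentiments : List String) : Prop :=
  texts.length ≤ sentiments.length
instance (texts : List String) (sentiments : List String) : Decidable (Pre_sort_text_by_sentiment texts sentiments) := by unfold Pre_sort_text_by_sentiment; infer_instance

def pvWitness_sort_text_by_sentiment : List String × List String :=
  (["a", "b", "c"], ["neutral", "positive", "negative"])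

def Spec_sort_text_by_sentiment (texts : List String) (sentiments : List String) (out : List String × List String) : Prop := out = sort_text_by_sentiment_alt texts sentiments
instance (texts : List String) (sentiments : List String) (out : List String × List String) : Decidable (Spec_sort_text_by_sentiment texts sentiments out) := by unfold Spec_sort_text_by_sentiment; infer_instance

-- ===== CLAIM (what is proved, stated in full; the proofs are below) =====
def Claim_equal_sort_text_by_sentiment : Prop := ∀ (texts : List String) (sentiments : List String), Dom_sort_text_by_sentiment texts sentiments → Pre_sort_text_by_sentiment texts sentiments → Spec_sort_text_by_sentiment texts sentiments (sort_text_by_sentiment texts sentiments)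

-- ===== LEMMAS AND PROOFS =====

-- the priority key B sorts by, as a case split
theorem pvOrder_getD (s : String) :
    PySem.Dict.getD pvOrder s 2 = if s = "positive" then 0 else if s = "negative" then 1 else 2 := by
  have h : pvOrder = PySem.Dict.mk [("positive", 0), ("negative", 1)] := by rfl
  rw [h, PySem.Dict.getD, PySem.Dict.get?_mk_cons, PySem.Dict.get?_mk_cons]
  by_cases h1 : s = "positive"
  · subst h1; decide
  · by_cases h2 : s = "negative"
    · subst h2; decide
    · have e1 : ("positive" == s) = false := beq_eq_false_iff_ne.mpr (fun e => h1 e.symm)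
      have e2 : ("negative" == s) = false := beq_eq_false_iff_ne.mpr (fun e => h2 e.symm)
      have e3 : (PySem.Dict.mk ([] : List (String × Int))).get? s = none := rfl
      simp [e1, e2, e3, h1, h2]

theorem pvOrder_getD_cases (s : String) :
    PySem.Dict.getD pvOrder s 2 = 0 ∨ PySem.Dict.getD pvOrder s 2 = 1 ∨ PySem.Dict.getD pvOrder s 2 = 2 := by
  rw [pvOrder_getD]; split_ifs <;> simp

-- inserting x after a block A it does not precede and before a block B it precedes
theorem insertBy_append_mid {α : Type} (before : α → α → Bool) (x : α) (A B : List α)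
    (hA : ∀ y ∈ A, before x y = false) (hB : ∀ b ∈ B, before x b = true) :
    PySem.List.insertBy before x (A ++ B) = A ++ x :: B := by
  induction A with
  | nil =>
    cases B with
    | nil => rfl
    | cons b t => simp [PySem.List.insertBy, hB b (List.mem_cons_self)]
  | cons a A ih =>
    simp only [List.cons_append, PySem.List.insertBy, hA a (List.mem_cons_self)]
    simp [ih (fun y hy => hA y (List.mem_cons_of_mem a hy))]

-- a stable sort under a {0,1,2}-valued key is the concatenation of the three filter groups
theorem sorted_three_groups {α : Type} (key : α → Int) (xs : List α)
    (hk : ∀ x ∈ xs, key x = 0 ∨ key x = 1 ∨ key x = 2) :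
    PySem.List.sorted xs key =
      xs.filter (fun x => key x == 0) ++ xs.filter (fun x => key x == 1) ++ xs.filter (fun x => key x == 2) := by
  induction xs using List.reverseRecOn with
  | nil => rfl
  | append_singleton xs x ih =>
    have hxs : ∀ y ∈ xs, key y = 0 ∨ key y = 1 ∨ key y = 2 :=
      fun y hy => hk y (List.mem_append_left _ hy)
    have hmem0 : ∀ y ∈ xs.filter (fun x => key x == 0), key y = 0 := by
      intro y hy; simpa using (List.mem_filter.mp hy).2
    have hmem1 : ∀ y ∈ xs.filter (fun x => key x == 1), key y = 1 := by
      intro y hy; simpa using (List.mem_filter.mp hy).2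
    have hmem2 : ∀ y ∈ xs.filter (fun x => key x == 2), key y = 2 := by
      intro y hy; simpa using (List.mem_filter.mp hy).2
    rw [PySem.List.sorted_eq_foldl_insertBy, List.foldl_append,
        ← PySem.List.sorted_eq_foldl_insertBy, ih hxs]
    simp only [List.foldl_cons, List.foldl_nil, List.filter_append]
    rcases hk x (List.mem_append_right _ (List.mem_cons_self)) with h | h | h
    · rw [show (xs.filter (fun x => key x == 0) ++ xs.filter (fun x => key x == 1) ++
            xs.filter (fun x => key x == 2)) =
          xs.filter (fun x => key x == 0) ++
            (xs.filter (fun x => key x == 1) ++ xs.filter (fun x => key x == 2)) by simp,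
        insertBy_append_mid]
      · simp [h]
      · intro y hy; have := hmem0 y hy; simp [h, this]
      · intro b hb
        rcases List.mem_append.mp hb with hb | hb
        · have := hmem1 b hb; simp [h, this]
        · have := hmem2 b hb; simp [h, this]
    · rw [show (xs.filter (fun x => key x == 0) ++ xs.filter (fun x => key x == 1) ++
            xs.filter (fun x => key x == 2)) =
          (xs.filter (fun x => key x == 0) ++ xs.filter (fun x => key x == 1)) ++
            xs.filter (fun x => key x == 2) by simp,
        insertBy_append_mid]
      · simp [h]
      · intro y hy
        rcases List.mem_append.mp hy with hy | hy
        · have := hmem0 y hy; simp [h, this]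
        · have := hmem1 y hy; simp [h, this]
      · intro b hb; have := hmem2 b hb; simp [h, this]
    · rw [show (xs.filter (fun x => key x == 0) ++ xs.filter (fun x => key x == 1) ++
            xs.filter (fun x => key x == 2)) =
          (xs.filter (fun x => key x == 0) ++ xs.filter (fun x => key x == 1) ++
            xs.filter (fun x => key x == 2)) ++ [] by simp,
        insertBy_append_mid]
      · simp [h]
      · intro y hy
        rcases List.mem_append.mp hy with hy | hy
        · rcases List.mem_append.mp hy with hy' | hy'
          · have := hmem0 y hy'; simp [h, this]
          · have := hmem1 y hy'; simp [h, this]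
        · have := hmem2 y hy; simp [h, this]
      · intro b hb; cases hb

-- A's accumulator loop, characterised by filters over the enumerated list
theorem foldA_spec (sentiments : List String) (E : List (Int × String))
    (pt nt ut ps ns us : List String) :
    E.foldl (pvStepA sentiments) ((pt, nt, ut), (ps, ns, us)) =
      ((pt ++ (E.filter (fun p => PySem.List.pyGetD sentiments p.1 "" == "positive")).map (·.2),
        nt ++ (E.filter (fun p => PySem.List.pyGetD sentiments p.1 "" == "negative")).map (·.2),
        ut ++ (E.filter (fun p => !(PySem.List.pyGetD sentiments p.1 "" == "positive") &&
                                  !(PySem.List.pyGetD sentiments p.1 "" == "negative"))).map (·.2)),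
       (ps ++ (E.filter (fun p => PySem.List.pyGetD sentiments p.1 "" == "positive")).map
                (fun p => PySem.List.pyGetD sentiments p.1 ""),
        ns ++ (E.filter (fun p => PySem.List.pyGetD sentiments p.1 "" == "negative")).map
                (fun p => PySem.List.pyGetD sentiments p.1 ""),
        us ++ (E.filter (fun p => !(PySem.List.pyGetD sentiments p.1 "" == "positive") &&
                                  !(PySem.List.pyGetD sentiments p.1 "" == "negative"))).map
                (fun p => PySem.List.pyGetD sentiments p.1 ""))) := by
  induction E generalizing pt nt ut ps ns us with
  | nil => simp
  | cons p E ih =>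
    by_cases h1 : PySem.List.pyGetD sentiments p.1 "" = "positive"
    · simp [pvStepA, h1, List.foldl_cons, ih]
    · by_cases h2 : PySem.List.pyGetD sentiments p.1 "" = "negative"
      · simp [pvStepA, h2, List.foldl_cons, ih]
      · simp [pvStepA, h1, h2, List.foldl_cons, ih]

-- the key conditions, in terms of the sentiment strings
theorem key_cond0 (sentiments : List String) (i : Int) :
    ((PySem.Dict.getD pvOrder (PySem.List.pyGetD sentiments i "") 2 : Int) == 0) =
      (PySem.List.pyGetD sentiments i "" == "positive") := by
  rw [pvOrder_getD]; split_ifs with h1 h2 <;> simp_all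

theorem key_cond1 (sentiments : List String) (i : Int) :
    ((PySem.Dict.getD pvOrder (PySem.List.pyGetD sentiments i "") 2 : Int) == 1) =
      (PySem.List.pyGetD sentiments i "" == "negative") := by
  rw [pvOrder_getD]; split_ifs with h1 h2 <;> simp_all

theorem key_cond2 (sentiments : List String) (i : Int) :
    ((PySem.Dict.getD pvOrder (PySem.List.pyGetD sentiments i "") 2 : Int) == 2) =
      (!(PySem.List.pyGetD sentiments i "" == "positive") &&
       !(PySem.List.pyGetD sentiments i "" == "negative")) := by
  rw [pvOrder_getD]; split_ifs with h1 h2 <;> simp_all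

-- ===== VERDICT (by name: the statement is the Claim_ definition above) =====
theorem sort_text_by_sentiment_spec : Claim_equal_sort_text_by_sentiment := by
  intro texts sentiments _ _
  unfold Spec_sort_text_by_sentiment
  unfold sort_text_by_sentiment sort_text_by_sentiment_alt
  simp only []
  rw [PySem.List.enumerate_eq_map_pyRange texts "", foldA_spec,
      sorted_three_groups _ _ (fun i _ => pvOrder_getD_cases (PySem.List.pyGetD sentiments i "")),
      List.filter_map, List.filter_map, List.filter_map]
  simp only [List.map_map, Function.comp_def, List.nil_append, List.map_append]
  rw [List.filter_congr (fun i (_ : i ∈ PySem.List.pyRange 0 (PySem.List.len texts)) =>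
        key_cond0 sentiments i),
      List.filter_congr (fun i (_ : i ∈ PySem.List.pyRange 0 (PySem.List.len texts)) =>
        key_cond1 sentiments i),
      List.filter_congr (fun i (_ : i ∈ PySem.List.pyRange 0 (PySem.List.len texts)) =>
        key_cond2 sentiments i)]
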